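-- pv_equiv track=rewrite | github.com/BiffoBear/Datarecorder | commandline/commandlinetools.py | _layout_existing_things
-- ===== SOURCE A (Python) =====
-- def _layout_existing_things(thing_name=None, existing_things=None):
--     """Lay out a list of integers in rows of 16."""
--     if not existing_things:
--         string_to_print = f"No existing {thing_name}s in database"
--     else:
--         print_items = [f"Existing {thing_name.title()}s\n"]
--         for index, thing in enumerate(existing_things):
--             if index % 16 == 0:
--                 print_items.append("\n")
--             print_items.append(f"{thing:02x} ")
--         print_items.append("\n\n")
--         string_to_print = "".join(print_items)
--     return string_to_print
-- ===== SOURCE B (Python) =====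
-- def _layout_existing_things(thing_name=None, existing_things=None):
--     """Lay out a list of integers in rows of 16."""
--     if not existing_things:
--         return f"No existing {thing_name}s in database"
--     rows = []
--     for start in range(0, len(existing_things), 16):
--         chunk = existing_things[start:start + 16]
--         rows.append("\n" + "".join(f"{t:02x} " for t in chunk))
--     return f"Existing {thing_name.title()}s\n" + "".join(rows) + "\n\n"
-- ===== Notes on version B (the rewrite author's own statement) =====
-- stated objective: alternative
-- what changed: Replaces A's flat element-by-element loop that tests each running index modulo sixteen to decide where a newline goes by an outer loop over chunk start offsets in steps of sixteen, slicing and formatting one newline-prefixed row per chunk and joining header, rows and footer directly instead of accumulating every fragment in one list.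
import Mathlib
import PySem

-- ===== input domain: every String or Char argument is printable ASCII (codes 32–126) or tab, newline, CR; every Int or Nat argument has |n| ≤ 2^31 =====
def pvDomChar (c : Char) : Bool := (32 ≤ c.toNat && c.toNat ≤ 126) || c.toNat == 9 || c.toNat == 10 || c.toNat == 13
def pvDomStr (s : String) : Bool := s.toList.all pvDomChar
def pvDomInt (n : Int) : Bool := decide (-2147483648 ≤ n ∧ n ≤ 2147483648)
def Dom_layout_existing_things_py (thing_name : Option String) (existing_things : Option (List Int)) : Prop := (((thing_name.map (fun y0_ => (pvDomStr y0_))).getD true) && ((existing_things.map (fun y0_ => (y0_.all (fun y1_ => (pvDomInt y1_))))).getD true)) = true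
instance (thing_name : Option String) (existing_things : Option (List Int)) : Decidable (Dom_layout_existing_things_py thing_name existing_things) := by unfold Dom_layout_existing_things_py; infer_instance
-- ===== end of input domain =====

-- B replaces A's flat indexed loop (newline when index % 16 == 0, one flat fragment list, final join)
-- by an outer loop over chunk start offsets in steps of 16, one newline-prefixed row per slice; no speed claim.

-- ===== PORT A =====
-- A-side string-formatting helpers: hand ports of Python's f-string primitives, exact on ASCII.

-- one hex digit, lowercase (as in format(n, 'x'))
def pvHexDigit (n : Nat) : Char := Char.ofNat (if n < 10 then 48 + n else 87 + n)

-- hex digits of a Nat, most significant first (format(n, 'x') for n ≥ 0)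
def pvHexNat (n : Nat) : List Char :=
  if h : n < 16 then [pvHexDigit n]
  else pvHexNat (n / 16) ++ [pvHexDigit (n % 16)]
  termination_by n
  decreasing_by exact Nat.div_lt_self (by omega) (by omega)

-- f"{n:02x} " : sign, hex digits of |n|, zero-padded to total width 2 (sign stays in front), trailing space
def pvFmt02x (n : Int) : List Char :=
  PySem.Chars.zfill ((if n < 0 then ['-'] else []) ++ pvHexNat n.natAbs) 2 ++ [' ']

-- str.title(), hand port exact on ASCII: uppercase a letter after a non-letter, lowercase otherwise
def pvTitleGo (prev : Bool) : List Char → List Char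
  | [] => []
  | c :: cs =>
    (if PySem.Chars.isalpha c then
        (if prev then PySem.Chars.lowerChar c else PySem.Chars.upperChar c)
      else c) :: pvTitleGo (PySem.Chars.isalpha c) cs

-- thing_name.title(); on none Python raises AttributeError (excluded by Pre_), value here arbitrary
def pvTitleOpt : Option String → List Char
  | none => []
  | some s => pvTitleGo false s.toList

-- f-string interpolation of thing_name (str(None) = "None")
def pvStrOfOptName : Option String → List Char
  | none => "None".toList
  | some s => s.toList

def layout_existing_things_py (thing_name : Option String) (existing_things : Option (List Int)) : String :=
  match existing_things with
  | some (x :: xs) =>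
      -- print_items = [header]; for index, thing in enumerate(...): if index % 16 == 0: append "\n"; append f"{thing:02x} "
      let items := (PySem.List.enumerate (x :: xs) 0).foldl
        (fun acc p =>
          let acc := if PySem.Int.mod p.1 16 = 0 then acc ++ [['\n']] else acc
          acc ++ [pvFmt02x p.2])
        ["Existing ".toList ++ pvTitleOpt thing_name ++ ['s', '\n']]
      String.mk (items ++ [['\n', '\n']]).flatten
  | _ => String.mk ("No existing ".toList ++ pvStrOfOptName thing_name ++ "s in database".toList)

-- ===== PORT B =====
-- B-side ports of the f-string primitives Source B uses, implemented differently from the A side: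
-- hex via a tail-recursive accumulator loop with a digit-table lookup, title() via a foldl
-- carrying (prev-is-alpha, reversed-output), option interpolation via Option.map/getD.

-- one lowercase hex digit by table lookup
def pvHexDigitB (n : Nat) : Char := "0123456789abcdef".toList.getD n '0'

-- hex digits of |n|, built least-significant-first into an accumulator (format(n, 'x'))
def pvHexNatB (n : Nat) (acc : List Char) : List Char :=
  let acc' := pvHexDigitB (n % 16) :: acc
  if _h : n < 16 then acc' else pvHexNatB (n / 16) acc'
  termination_by n
  decreasing_by exact Nat.div_lt_self (by omega) (by omega)

-- f"{n:02x} ": sign then digits, left-padded with '0' to width 2, trailing space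
def pvFmt02xB (n : Int) : List Char :=
  PySem.Chars.zfill ((if n < 0 then ['-'] else []) ++ pvHexNatB n.natAbs []) 2 ++ [' ']

-- str.title() as a single foldl producing the output reversed, exact on ASCII
def pvTitleB (cs : List Char) : List Char :=
  (cs.foldl (fun (st : Bool × List Char) c =>
      (PySem.Chars.isalpha c,
       (if PySem.Chars.isalpha c then
          (if st.1 then PySem.Chars.lowerChar c else PySem.Chars.upperChar c)
        else c) :: st.2))
    (false, [])).2.reverse

-- thing_name.title(); on none Python raises AttributeError (excluded by Pre_), value here arbitrary
def pvTitleOptB (o : Option String) : List Char := ((o.map fun s => pvTitleB s.toList).getD [])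

-- f-string interpolation of thing_name (str(None) = "None")
def pvStrOfOptNameB (o : Option String) : List Char := (o.map String.toList).getD "None".toList

def layout_existing_things_py_alt (thing_name : Option String) (existing_things : Option (List Int)) : String :=
  -- 'if not existing_things' is true exactly for None and []: both collapse to the empty list
  let l := existing_things.getD []
  if l.isEmpty then
    String.mk ("No existing ".toList ++ pvStrOfOptNameB thing_name ++ "s in database".toList)
  else
    -- rows = []; for start in range(0, len(l), 16): rows.append("\n" + "".join(f"{t:02x} " for t in l[start:start+16]))
    let rows := (PySem.List.pyRange 0 (PySem.List.len l) 16).foldl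
      (fun acc start =>
        acc ++ ['\n' :: (PySem.List.slice l (some start) (some (start + 16))).flatMap pvFmt02xB])
      []
    String.mk (("Existing ".toList ++ pvTitleOptB thing_name ++ ['s', '\n'])
      ++ rows.flatten ++ ['\n', '\n'])

-- ===== PRECONDITION & SPEC =====
-- Pre_ excludes only inputs where A (and B) raise AttributeError: thing_name = None with a nonempty list
def Pre_layout_existing_things_py (thing_name : Option String) (existing_things : Option (List Int)) : Prop :=
  thing_name = none → (existing_things = none ∨ existing_things = some [])
instance (thing_name : Option String) (existing_things : Option (List Int)) : Decidable (Pre_layout_existing_things_py thing_name existing_things) := by unfold Pre_layout_existing_things_py; infer_instance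

def pvWitness_layout_existing_things_py : Option String × Option (List Int) := (some "led", some [0, 1, 255, -1])

def Spec_layout_existing_things_py (thing_name : Option String) (existing_things : Option (List Int)) (out : String) : Prop := out = layout_existing_things_py_alt thing_name existing_things
instance (thing_name : Option String) (existing_things : Option (List Int)) (out : String) : Decidable (Spec_layout_existing_things_py thing_name existing_things out) := by unfold Spec_layout_existing_things_py; infer_instance

-- ===== CLAIM (what is proved, stated in full; the proofs are below) =====
def Claim_equal_layout_existing_things_py : Prop := ∀ (thing_name : Option String) (existing_things : Option (List Int)), Dom_layout_existing_things_py thing_name existing_things → Pre_layout_existing_things_py thing_name existing_things → Spec_layout_existing_things_py thing_name existing_things (layout_existing_things_py thing_name existing_things)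

-- ===== LEMMAS AND PROOFS =====

-- the B-side helper implementations compute the same strings as the A-side ones
theorem pvHexDigitB_eq (n : Nat) (h : n < 16) : pvHexDigitB n = pvHexDigit n := by
  interval_cases n <;> rfl

theorem pvHexNatB_eq (n : Nat) : ∀ acc, pvHexNatB n acc = pvHexNat n ++ acc := by
  induction n using Nat.strong_induction_on with
  | _ n ih =>
    intro acc
    rw [pvHexNatB, pvHexNat]
    split_ifs with h
    · rw [Nat.mod_eq_of_lt h, pvHexDigitB_eq n h]; rfl
    · rw [ih (n / 16) (Nat.div_lt_self (by omega) (by omega)),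
        pvHexDigitB_eq (n % 16) (Nat.mod_lt n (by omega))]
      simp

theorem pvFmt02xB_eq : pvFmt02xB = pvFmt02x := by
  funext n
  rw [pvFmt02xB, pvFmt02x, pvHexNatB_eq, List.append_nil]

theorem pvTitleB_go (cs : List Char) : ∀ (prev : Bool) (acc : List Char),
    ((cs.foldl (fun (st : Bool × List Char) c =>
      (PySem.Chars.isalpha c,
       (if PySem.Chars.isalpha c then
          (if st.1 then PySem.Chars.lowerChar c else PySem.Chars.upperChar c)
        else c) :: st.2))
      (prev, acc)).2).reverse = acc.reverse ++ pvTitleGo prev cs := by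
  induction cs with
  | nil => intro prev acc; simp [pvTitleGo]
  | cons c cs ih => intro prev acc; rw [List.foldl_cons, ih, pvTitleGo]; simp

theorem pvTitleOptB_eq : pvTitleOptB = pvTitleOpt := by
  funext o
  cases o with
  | none => rfl
  | some s =>
    show pvTitleB s.toList = pvTitleGo false s.toList
    rw [pvTitleB, pvTitleB_go]; rfl

theorem pvStrOfOptNameB_eq : pvStrOfOptNameB = pvStrOfOptName := by
  funext o; cases o <;> rfl

-- proof-side characterisation of the loop bodies: one newline-prefixed row per 16-element chunk
def pvRows (xs : List Int) : List Char :=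
  if h : xs = [] then []
  else ('\n' :: (xs.take 16).flatMap pvFmt02x) ++ pvRows (xs.drop 16)
  termination_by xs.length
  decreasing_by
    cases xs with
    | nil => exact absurd rfl h
    | cons a as => simp only [List.length_drop, List.length_cons]; omega

theorem pyRange16_cons (a b : Int) (h : a < b) :
    PySem.List.pyRange a b 16 = a :: PySem.List.pyRange (a + 16) b 16 := by
  rw [PySem.List.pyRange_of_pos a b (by norm_num), PySem.List.pyRange_of_pos (a + 16) b (by norm_num),
    if_pos h]
  have key : (b - a + 16 - 1) / 16 = (b - (a + 16) + 16 - 1) / 16 + 1 := by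
    have e : b - a + 16 - 1 = (b - (a + 16) + 16 - 1) + 1 * 16 := by ring
    rw [e, Int.add_mul_ediv_right _ _ (by norm_num)]
  rw [key]
  by_cases h2 : a + 16 < b
  · rw [if_pos h2]
    have hpos : 0 ≤ (b - (a + 16) + 16 - 1) / 16 := Int.ediv_nonneg (by omega) (by norm_num)
    have hn : ((b - (a + 16) + 16 - 1) / 16 + 1).toNat = ((b - (a + 16) + 16 - 1) / 16).toNat + 1 := by
      omega
    rw [hn, List.range_succ_eq_map, List.map_cons, List.map_map]
    congr 1
    · simp
    · refine List.map_congr_left (fun k _ => ?_)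
      simp only [Function.comp_apply, Nat.succ_eq_add_one]
      push_cast
      ring
  · rw [if_neg h2]
    have h0 : (b - (a + 16) + 16 - 1) / 16 = 0 :=
      Int.ediv_eq_zero_of_lt (by omega) (by omega)
    rw [h0]
    norm_num [List.range_one]

theorem pyRange16_nil (a b : Int) (h : ¬ a < b) : PySem.List.pyRange a b 16 = [] := by
  rw [PySem.List.pyRange_of_pos a b (by norm_num), if_neg h]
  rfl

theorem fB_flat_nil (l : List Int) (a : Int) (h : ¬ a < PySem.List.len l) :
    ((PySem.List.pyRange a (PySem.List.len l) 16).map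
      (fun start => '\n' :: (PySem.List.slice l (some start) (some (start + 16))).flatMap pvFmt02x)).flatten
    = pvRows (l.drop a.toNat) := by
  rw [pyRange16_nil _ _ h]
  have hd : l.drop a.toNat = [] := by
    apply List.drop_eq_nil_of_le
    simp only [PySem.List.len_eq] at h
    omega
  rw [hd, pvRows]
  rfl

theorem fB_flat (n : Nat) : ∀ (l : List Int) (a : Int), 0 ≤ a → l.length - a.toNat ≤ n →
    ((PySem.List.pyRange a (PySem.List.len l) 16).map
      (fun start => '\n' :: (PySem.List.slice l (some start) (some (start + 16))).flatMap pvFmt02x)).flatten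
    = pvRows (l.drop a.toNat) := by
  induction n with
  | zero =>
      intro l a ha hn
      apply fB_flat_nil
      simp only [PySem.List.len_eq]
      omega
  | succ n ih =>
      intro l a ha hn
      by_cases hab : a < PySem.List.len l
      · have hlen : a.toNat < l.length := by simp only [PySem.List.len_eq] at hab; omega
        have h16 : (a + 16).toNat = a.toNat + 16 := by omega
        rw [pyRange16_cons _ _ hab, List.map_cons, List.flatten_cons,
          PySem.List.slice_toNat l ha (by omega),
          ih l (a + 16) (by omega) (by omega), h16]
        conv_rhs => rw [pvRows]
        rw [dif_neg (show l.drop a.toNat ≠ [] by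
          intro hc
          have := congrArg List.length hc
          simp [List.length_drop] at this
          omega)]
        simp [List.drop_drop]
      · exact fB_flat_nil l a hab

-- the body A's loop produces, as a structural recursion on the list with a running index
def fA (i : Int) : List Int → List Char
  | [] => []
  | t :: ts => (if PySem.Int.mod i 16 = 0 then ['\n'] else []) ++ pvFmt02x t ++ fA (i + 1) ts

theorem fA_foldl (l : List Int) : ∀ (i : Int) (acc : List (List Char)),
    ((PySem.List.enumerate l i).foldl
      (fun acc p =>
        (if PySem.Int.mod p.1 16 = 0 then acc ++ [['\n']] else acc) ++ [pvFmt02x p.2])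
      acc).flatten = acc.flatten ++ fA i l := by
  induction l with
  | nil => intro i acc; simp [PySem.List.enumerate, fA]
  | cons t ts ih =>
      intro i acc
      rw [PySem.List.enumerate_cons, List.foldl_cons, ih]
      by_cases h : (16 : Int) ∣ i <;>
        simp [fA, h, List.flatten_append, List.append_assoc]

theorem fA_congr (ts : List Int) : ∀ i j : Int, PySem.Int.mod i 16 = PySem.Int.mod j 16 →
    fA i ts = fA j ts := by
  induction ts with
  | nil => intros; rfl
  | cons t ts ih =>
      intro i j h
      have hmod : ∀ k : Int, PySem.Int.mod k 16 = k % 16 :=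
        fun k => PySem.Int.mod_eq_emod_of_pos (by norm_num)
      have h' : PySem.Int.mod (i + 1) 16 = PySem.Int.mod (j + 1) 16 := by
        rw [hmod, hmod, Int.add_emod, Int.add_emod j, ← hmod i, ← hmod j, h]
      simp only [fA, h, ih _ _ h']

-- inside a chunk (index is 1..15 throughout) A appends no newline
theorem fA_inner (ts : List Int) : ∀ i : Int, 1 ≤ i → i + ts.length ≤ 16 →
    fA i ts = ts.flatMap pvFmt02x := by
  induction ts with
  | nil => intros; rfl
  | cons t ts ih =>
      intro i h1 h2
      have hm : PySem.Int.mod i 16 ≠ 0 := by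
        rw [PySem.Int.mod_eq_emod_of_pos (by norm_num)]
        simp only [List.length_cons] at h2
        omega
      simp only [fA, if_neg hm, List.flatMap_cons, List.nil_append]
      rw [ih (i + 1) (by omega) (by simp at h2 ⊢; omega)]

theorem fA_append (ys zs : List Int) : ∀ i : Int,
    fA i (ys ++ zs) = fA i ys ++ fA (i + ys.length) zs := by
  induction ys with
  | nil => intro i; simp [fA]
  | cons y ys ih =>
      intro i
      simp only [List.cons_append, fA, ih, List.length_cons, List.append_assoc]
      congr 3
      push_cast
      ring_nf

theorem fA_eq_pvRows (n : Nat) : ∀ l : List Int, l.length ≤ n → fA 0 l = pvRows l := by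
  induction n with
  | zero =>
      intro l hl
      have : l = [] := List.eq_nil_of_length_eq_zero (by omega)
      subst this; rw [pvRows]; rfl
  | succ n ih =>
      intro l hl
      cases l with
      | nil => rw [pvRows]; rfl
      | cons t ts =>
        have hm0 : PySem.Int.mod 0 16 = 0 := by decide
        rw [pvRows, dif_neg (List.cons_ne_nil t ts)]
        conv_lhs => rw [← List.take_append_drop 16 (t :: ts)]
        rw [fA_append]
        by_cases hlen : (t :: ts).length ≤ 16
        · have hdrop : (t :: ts).drop 16 = [] := List.drop_eq_nil_of_le hlen
          have htake : (t :: ts).take 16 = t :: ts := List.take_of_length_le hlen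
          rw [hdrop, htake]
          simp only [fA, zero_add, if_pos hm0]
          rw [fA_inner ts 1 (by omega) (by simp at hlen ⊢; omega)]
          simp [List.flatMap_cons, pvRows]
        · have htlen : ((t :: ts).take 16).length = 16 := by
            rw [List.length_take]; omega
          have htake : (t :: ts).take 16 = t :: ts.take 15 := rfl
          have hA1 : fA 0 ((t :: ts).take 16) = '\n' :: ((t :: ts).take 16).flatMap pvFmt02x := by
            rw [htake]
            simp only [fA, zero_add, if_pos hm0]
            rw [fA_inner (ts.take 15) 1 (by omega) (by simp [List.length_take]; omega)]
            simp [List.flatMap_cons]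
          have hA2 : fA (0 + ((t :: ts).take 16).length) ((t :: ts).drop 16)
              = pvRows ((t :: ts).drop 16) := by
            rw [htlen]
            rw [fA_congr ((t :: ts).drop 16) ((0 : Int) + (16 : Nat)) 0 (by decide)]
            exact ih _ (by simp [List.length_drop] at hl ⊢; omega)
          rw [hA1, hA2]

-- ===== VERDICT (by name: the statement is the Claim_ definition above) =====
theorem layout_existing_things_py_spec : Claim_equal_layout_existing_things_py := by
  intro tn et _ _
  unfold Spec_layout_existing_things_py layout_existing_things_py layout_existing_things_py_alt
  match et with
  | none => simp [pvStrOfOptNameB_eq]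
  | some [] => simp [pvStrOfOptNameB_eq]
  | some (x :: xs) =>
      simp only [Option.getD_some, List.isEmpty_cons, Bool.false_eq_true, if_false,
        pvFmt02xB_eq, pvTitleOptB_eq]
      congr 1
      rw [List.flatten_append, fA_foldl (x :: xs) 0,
        fA_eq_pvRows (x :: xs).length (x :: xs) (le_refl _),
        PySem.List.foldl_append_singleton_eq_map
          (fun start => '\n' :: (PySem.List.slice (x :: xs) (some start) (some (start + 16))).flatMap pvFmt02x)
          (PySem.List.pyRange 0 (PySem.List.len (x :: xs)) 16) [],
        List.nil_append, fB_flat (x :: xs).length (x :: xs) 0 (le_refl 0) (by simp)]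
      simp [List.append_assoc]
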